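-- pv_equiv track=rewrite | github.com/ashfaqsyedn/Daily-Code | 265.py | assign_bonuses
-- ===== SOURCE A (Python) =====
-- def assign_bonuses(lines):
--     bonuses = [1 for _ in range(len(lines))]
--
--     for i in range(1, len(lines)):
--         if lines[i] > lines[i - 1]:
--             bonuses[i] = bonuses[i - 1] + 1
--
--     for i in range(len(lines) - 2, -1, -1):
--         if lines[i] > lines[i + 1]:
--             bonuses[i] = max(bonuses[i], bonuses[i + 1] + 1)
--
--     return bonuses
-- ===== SOURCE B (Python) =====
-- def assign_bonuses(lines):
--     # One forward pass: strictly-decreasing stretches are buffered in a counter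
--     # and written out (plus a peak fix-up) only when the stretch ends.
--     def flush(res, pending):
--         if pending:
--             res[-1] = max(res[-1], pending + 1)
--             res.extend(range(pending, 0, -1))
--         return res
--
--     res = []
--     pending = 0
--     prev = None
--     for x in lines:
--         if prev is not None and x < prev:
--             pending += 1
--         else:
--             res = flush(res, pending)
--             pending = 0
--             res.append(res[-1] + 1 if prev is not None and x > prev else 1)
--         prev = x
--     return flush(res, pending)
-- ===== Notes on version B (the rewrite author's own statement) =====
-- stated objective: alternative
-- what changed: A makes two index-loop passes over a preallocated bonuses array (forward increasing pass, then a backward pass patching with max); B makes a single forward pass that buffers each strictly-decreasing stretch in a counter and, only when the stretch ends, fixes up the peak and emits the buffered positions' values in one extend.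
import Mathlib
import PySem

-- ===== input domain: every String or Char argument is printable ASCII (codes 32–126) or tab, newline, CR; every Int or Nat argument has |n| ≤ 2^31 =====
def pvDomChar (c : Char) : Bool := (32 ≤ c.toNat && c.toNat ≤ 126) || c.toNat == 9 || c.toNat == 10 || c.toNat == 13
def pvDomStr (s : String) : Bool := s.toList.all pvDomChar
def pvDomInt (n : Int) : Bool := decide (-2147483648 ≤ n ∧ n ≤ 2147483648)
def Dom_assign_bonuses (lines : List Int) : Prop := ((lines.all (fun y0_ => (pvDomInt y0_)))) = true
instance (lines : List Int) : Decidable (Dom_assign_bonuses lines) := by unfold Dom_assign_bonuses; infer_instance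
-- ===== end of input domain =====

-- B replaces A's two index-loop passes over one mutated array by a single forward pass
-- that buffers each strictly-decreasing stretch in a counter and emits it (with a peak
-- fix-up) only when the stretch ends; alternative decomposition, same O(n) cost.


-- ===== PORT A =====
-- body of A's forward loop: for i in range(1, len(lines)): if lines[i] > lines[i-1]: bonuses[i] = bonuses[i-1] + 1
def pvFwdStep (lines : List Int) (b : List Int) (i : Nat) : List Int :=
  if lines[i]! > lines[i-1]! then b.set i (b[i-1]! + 1) else b

-- body of A's backward loop: for i in range(len(lines)-2, -1, -1): if lines[i] > lines[i+1]: bonuses[i] = max(bonuses[i], bonuses[i+1] + 1)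
def pvBwdStep (lines : List Int) (b : List Int) (i : Nat) : List Int :=
  if lines[i]! > lines[i+1]! then b.set i (max b[i]! (b[i+1]! + 1)) else b

-- all loop indices are in range, so plain list indexing is exact here;
-- range(1, n) = List.range' 1 (n-1); range(n-2, -1, -1) = (List.range (n-1)).reverse
def assign_bonuses (lines : List Int) : List Int :=
  let n := lines.length
  let bonuses := List.replicate n (1 : Int)
  let bonuses := (List.range' 1 (n - 1)).foldl (pvFwdStep lines) bonuses
  let bonuses := ((List.range (n - 1)).reverse).foldl (pvBwdStep lines) bonuses
  bonuses

-- ===== PORT B =====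
-- B's helper flush(res, pending): if pending: res[-1] = max(res[-1], pending+1); res.extend(range(pending, 0, -1)).
-- res[-1] is read/written via getLast!/set (res.length-1); exact for nonempty res, and B only
-- flushes a nonzero pending when res is nonempty (pending counts elements after the first).
def pvFlushB (res : List Int) (pending : Int) : List Int :=
  if pending ≠ 0 then
    (res.set (res.length - 1) (max res.getLast! (pending + 1))) ++ PySem.List.pyRange pending 0 (-1)
  else res

-- one iteration of B's loop, state = (res, pending, prev)
def pvStepB (st : List Int × Int × Option Int) (x : Int) : List Int × Int × Option Int :=
  match st with
  | (res, pending, none) => (res ++ [1], 0, some x)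
  | (res, pending, some p) =>
      if x < p then (res, pending + 1, some x)
      else
        let res' := pvFlushB res pending
        (res' ++ [if x > p then res'.getLast! + 1 else 1], 0, some x)

def assign_bonuses_alt (lines : List Int) : List Int :=
  let st := lines.foldl pvStepB ([], 0, none)
  pvFlushB st.1 st.2.1

-- ===== PRECONDITION & SPEC =====
def Spec_assign_bonuses (lines : List Int) (out : List Int) : Prop := out = assign_bonuses_alt lines
instance (lines : List Int) (out : List Int) : Decidable (Spec_assign_bonuses lines out) := by unfold Spec_assign_bonuses; infer_instance

-- ===== CLAIM (what is proved, stated in full; the proofs are below) =====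
def Claim_equal_assign_bonuses : Prop := ∀ (lines : List Int), Dom_assign_bonuses lines → Spec_assign_bonuses lines (assign_bonuses lines)

-- ===== LEMMAS AND PROOFS =====

-- proof-only abbreviations: left/right strictly-increasing run lengths and their pointwise max
def pvRunsGo (prev run : Int) : List Int → List Int
  | [] => []
  | x :: xs => (if x > prev then run + 1 else 1) :: pvRunsGo x (if x > prev then run + 1 else 1) xs

def pvRuns : List Int → List Int
  | [] => []
  | x :: xs => 1 :: pvRunsGo x 1 xs

def pvL (lines : List Int) : List Int := pvRuns lines
def pvR (lines : List Int) : List Int := (pvRuns lines.reverse).reverse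
def pvF (lines : List Int) : List Int := List.zipWith max (pvL lines) (pvR lines)

-- generic list-surgery lemmas (getElem! is safe: every index used is in range)
lemma pv_getElem!_append_cons (l₁ l₂ : List Int) (a : Int) :
    (l₁ ++ a :: l₂)[l₁.length]! = a := by
  induction l₁ with
  | nil => simp
  | cons x xs ih => simpa using ih

lemma pv_getElem!_append_left (l₁ l₂ : List Int) (j : Nat) (h : j < l₁.length) :
    (l₁ ++ l₂)[j]! = l₁[j]! := by
  induction l₁ generalizing j with
  | nil => simp at h
  | cons x xs ih =>
    cases j with
    | zero => simp
    | succ j => simp only [List.cons_append, List.getElem!_cons_succ]; exact ih j (by simpa using h)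

lemma pv_set_append_cons (l₁ l₂ : List Int) (a v : Int) :
    (l₁ ++ a :: l₂).set l₁.length v = l₁ ++ v :: l₂ := by
  induction l₁ with
  | nil => simp
  | cons x xs ih => simpa using ih

lemma pv_drop_eq_cons (l : List Int) (j : Nat) (h : j < l.length) :
    l.drop j = l[j]! :: l.drop (j+1) := by
  rw [getElem!_pos l j h]; exact List.drop_eq_getElem_cons h

lemma pv_take_succ (l : List Int) (j : Nat) (h : j < l.length) :
    l.take (j+1) = l.take j ++ [l[j]!] := by
  rw [getElem!_pos l j h, List.take_succ, List.getElem?_eq_getElem h]; rfl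

lemma pv_getLast!_concat (l : List Int) (a : Int) : (l ++ [a]).getLast! = a := by
  induction l with
  | nil => rfl
  | cons x xs ih =>
    rcases xs with _ | ⟨y, ys⟩
    · rfl
    · simpa [List.getLast!, List.getLast_cons] using congrArg id ih

-- lengths
lemma pvRunsGo_length (prev run : Int) (xs : List Int) :
    (pvRunsGo prev run xs).length = xs.length := by
  induction xs generalizing prev run with
  | nil => rfl
  | cons x xs ih => simp [pvRunsGo, ih]

lemma pvRuns_length (xs : List Int) : (pvRuns xs).length = xs.length := by
  cases xs with
  | nil => rfl
  | cons x xs => simp [pvRuns, pvRunsGo_length]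

lemma pvL_length (lines : List Int) : (pvL lines).length = lines.length := pvRuns_length lines
lemma pvR_length (lines : List Int) : (pvR lines).length = lines.length := by
  simp [pvR, pvRuns_length]
lemma pvF_length (lines : List Int) : (pvF lines).length = lines.length := by
  simp [pvF, pvL_length, pvR_length]

-- every run length is ≥ 1
lemma pvRunsGo_mem_ge (prev run : Int) (xs : List Int) (hrun : 0 ≤ run) :
    ∀ y ∈ pvRunsGo prev run xs, 1 ≤ y := by
  induction xs generalizing prev run with
  | nil => simp [pvRunsGo]
  | cons x xs ih =>
    intro y hy
    simp only [pvRunsGo, List.mem_cons] at hy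
    rcases hy with rfl | hy
    · split <;> omega
    · exact ih x _ (by split <;> omega) y hy

lemma pvRuns_mem_ge (xs : List Int) : ∀ y ∈ pvRuns xs, 1 ≤ y := by
  cases xs with
  | nil => simp [pvRuns]
  | cons x xs =>
    intro y hy
    simp only [pvRuns, List.mem_cons] at hy
    rcases hy with rfl | hy
    · omega
    · exact pvRunsGo_mem_ge x 1 xs (by omega) y hy

lemma pvRuns_getElem!_ge (xs : List Int) (j : Nat) (h : j < xs.length) :
    1 ≤ (pvRuns xs)[j]! := by
  have hlen : j < (pvRuns xs).length := by rwa [pvRuns_length]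
  rw [getElem!_pos (pvRuns xs) j hlen]
  exact pvRuns_mem_ge xs _ (List.getElem_mem hlen)

lemma pvL_ge (lines : List Int) (j : Nat) (h : j < lines.length) : 1 ≤ (pvL lines)[j]! :=
  pvRuns_getElem!_ge lines j h

lemma pvR_ge (lines : List Int) (j : Nat) (h : j < lines.length) : 1 ≤ (pvR lines)[j]! := by
  have hlen : j < (pvR lines).length := by rwa [pvR_length]
  rw [getElem!_pos (pvR lines) j hlen]
  have hmem : (pvR lines)[j] ∈ pvR lines := List.getElem_mem hlen
  have hmem' : (pvR lines)[j] ∈ pvRuns lines.reverse := by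
    simpa [pvR] using hmem
  exact pvRuns_mem_ge lines.reverse _ hmem'

-- first element of runs
lemma pvRuns_zero (x : Int) (xs : List Int) : (pvRuns (x :: xs))[0]! = 1 := by
  simp [pvRuns]

-- the recurrence of runs
lemma pvRunsGo_succ (prev run : Int) (xs : List Int) (i : Nat) (h : i + 1 < xs.length) :
    (pvRunsGo prev run xs)[i+1]! =
      if xs[i+1]! > xs[i]! then (pvRunsGo prev run xs)[i]! + 1 else 1 := by
  induction xs generalizing prev run i with
  | nil => simp at h
  | cons x xs ih =>
    cases xs with
    | nil => simp at h
    | cons y ys =>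
      cases i with
      | zero => simp [pvRunsGo]
      | succ i =>
        have h' : i + 1 < (y :: ys).length := by simpa using h
        simpa [pvRunsGo] using ih x (if x > prev then run + 1 else 1) i h'

lemma pvRuns_succ (xs : List Int) (i : Nat) (h : i + 1 < xs.length) :
    (pvRuns xs)[i+1]! = if xs[i+1]! > xs[i]! then (pvRuns xs)[i]! + 1 else 1 := by
  cases xs with
  | nil => simp at h
  | cons x xs =>
    cases xs with
    | nil => simp at h
    | cons y ys =>
      cases i with
      | zero => simp [pvRuns, pvRunsGo]
      | succ i =>
        have h' : i + 1 < (y :: ys).length := by simpa using h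
        simpa [pvRuns] using pvRunsGo_succ x 1 (y :: ys) i h'

-- getElem! through reverse
lemma pv_getElem!_reverse (l : List Int) (i : Nat) (h : i < l.length) :
    l.reverse[i]! = l[l.length - 1 - i]! := by
  have h' : i < l.reverse.length := by simpa using h
  rw [getElem!_pos l.reverse i h', getElem!_pos l (l.length - 1 - i) (by omega)]
  exact List.getElem_reverse h'

-- pvR pointwise
lemma pvR_get (lines : List Int) (j : Nat) (h : j < lines.length) :
    (pvR lines)[j]! = (pvRuns lines.reverse)[lines.length - 1 - j]! := by
  have := pv_getElem!_reverse (pvRuns lines.reverse) j (by simpa [pvRuns_length] using h)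
  simpa [pvR, pvRuns_length] using this

lemma pvR_last (lines : List Int) (h : 1 ≤ lines.length) :
    (pvR lines)[lines.length - 1]! = 1 := by
  rw [pvR_get lines (lines.length - 1) (by omega)]
  have he : lines.length - 1 - (lines.length - 1) = 0 := by omega
  rw [he]
  cases hrev : lines.reverse with
  | nil =>
    have h0 : lines = [] := List.reverse_eq_nil_iff.mp hrev
    subst h0; simp at h
  | cons x xs => exact pvRuns_zero x xs

lemma pvR_succ (lines : List Int) (j : Nat) (h : j + 1 < lines.length) :
    (pvR lines)[j]! = if lines[j]! > lines[j+1]! then (pvR lines)[j+1]! + 1 else 1 := by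
  have hm : lines.length - 1 - j = (lines.length - 1 - (j+1)) + 1 := by omega
  rw [pvR_get lines j (by omega), pvR_get lines (j+1) h, hm,
      pvRuns_succ lines.reverse (lines.length - 1 - (j+1)) (by simp; omega),
      pv_getElem!_reverse lines ((lines.length - 1 - (j+1)) + 1) (by omega),
      pv_getElem!_reverse lines (lines.length - 1 - (j+1)) (by omega),
      show lines.length - 1 - ((lines.length - 1 - (j+1)) + 1) = j from by omega,
      show lines.length - 1 - (lines.length - 1 - (j+1)) = j + 1 from by omega]

-- pvF pointwise
lemma pvF_get (lines : List Int) (j : Nat) (h : j < lines.length) :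
    (pvF lines)[j]! = max (pvL lines)[j]! (pvR lines)[j]! := by
  have hL : j < (pvL lines).length := by rwa [pvL_length]
  have hR : j < (pvR lines).length := by rwa [pvR_length]
  have hF : j < (pvF lines).length := by rwa [pvF_length]
  rw [getElem!_pos _ j hF, getElem!_pos _ j hL, getElem!_pos _ j hR]
  simp [pvF]

lemma pv_getElem!_append_cons' (l₁ l₂ : List Int) (a : Int) (j : Nat) (h : l₁.length = j) :
    (l₁ ++ a :: l₂)[j]! = a := by subst h; exact pv_getElem!_append_cons l₁ l₂ a

lemma pv_set_append_cons' (l₁ l₂ : List Int) (a v : Int) (j : Nat) (h : l₁.length = j) :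
    (l₁ ++ a :: l₂).set j v = l₁ ++ v :: l₂ := by subst h; exact pv_set_append_cons l₁ l₂ a v

-- take/get helper
lemma pv_getElem!_take (l : List Int) (i j : Nat) (hj : j < i) (hl : j < l.length) :
    (l.take i)[j]! = l[j]! := by
  rw [getElem!_pos l j hl, getElem!_pos (l.take i) j (by simp; omega)]
  simp

-- ===== A-side: the two passes compute pvF =====
lemma pv_fwd_inv (lines : List Int) (k i : Nat) (hi : 1 ≤ i) (hik : i + k = lines.length)
    (b : List Int) (hb : b = (pvL lines).take i ++ List.replicate (lines.length - i) 1) :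
    (List.range' i k).foldl (pvFwdStep lines) b = pvL lines := by
  induction k generalizing i b with
  | zero =>
    subst hb
    have ht : (pvL lines).take i = pvL lines :=
      List.take_of_length_le (by rw [pvL_length]; omega)
    simp [ht, show lines.length - i = 0 from by omega]
  | succ k ih =>
    rw [List.range'_succ, List.foldl_cons]
    apply ih (i + 1) (by omega) (by omega)
    subst hb
    have hiN : i < lines.length := by omega
    have hrep : List.replicate (lines.length - i) (1 : Int)
        = 1 :: List.replicate (lines.length - (i + 1)) 1 := by
      rw [show lines.length - i = (lines.length - (i + 1)) + 1 from by omega, List.replicate_succ]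
    have hread : ((pvL lines).take i ++ List.replicate (lines.length - i) (1 : Int))[i-1]!
        = (pvL lines)[i-1]! := by
      rw [pv_getElem!_append_left _ _ (i-1) (by simp [pvL_length]; omega),
          pv_getElem!_take _ i (i-1) (by omega) (by rw [pvL_length]; omega)]
    have hlen : ((pvL lines).take i).length = i := by simp [pvL_length]; omega
    have hrec : (pvL lines)[i]! = if lines[i]! > lines[i-1]! then (pvL lines)[i-1]! + 1 else 1 := by
      have := pvRuns_succ lines (i-1) (by omega)
      rwa [show i - 1 + 1 = i from by omega] at this
    have htake : (pvL lines).take (i+1) = (pvL lines).take i ++ [(pvL lines)[i]!] :=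
      pv_take_succ _ i (by rw [pvL_length]; omega)
    unfold pvFwdStep
    rw [hread]
    by_cases hc : lines[i]! > lines[i-1]!
    · rw [if_pos hc, hrep, pv_set_append_cons' _ _ _ _ i hlen, htake, hrec, if_pos hc]
      simp
    · rw [if_neg hc, hrep, htake, hrec, if_neg hc]
      simp

lemma pv_bwd_step (lines : List Int) (j : Nat) (h : j + 2 ≤ lines.length) :
    pvBwdStep lines ((pvL lines).take (j+1) ++ (pvF lines).drop (j+1)) j
      = (pvL lines).take j ++ (pvF lines).drop j := by
  have hLlen : (pvL lines).length = lines.length := pvL_length lines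
  have hFlen : (pvF lines).length = lines.length := pvF_length lines
  have htake : (pvL lines).take (j+1) = (pvL lines).take j ++ [(pvL lines)[j]!] :=
    pv_take_succ _ j (by omega)
  have hdropj : (pvF lines).drop j = (pvF lines)[j]! :: (pvF lines).drop (j+1) :=
    pv_drop_eq_cons _ j (by omega)
  have hlen : ((pvL lines).take j).length = j := by simp; omega
  have hb : (pvL lines).take (j+1) ++ (pvF lines).drop (j+1)
      = (pvL lines).take j ++ ((pvL lines)[j]! :: (pvF lines).drop (j+1)) := by
    rw [htake, List.append_assoc]; rfl
  have hreadj : ((pvL lines).take (j+1) ++ (pvF lines).drop (j+1))[j]! = (pvL lines)[j]! := by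
    rw [hb, pv_getElem!_append_cons' _ _ _ j hlen]
  have hdropj1 : (pvF lines).drop (j+1) = (pvF lines)[j+1]! :: (pvF lines).drop (j+2) :=
    pv_drop_eq_cons _ (j+1) (by omega)
  have hlen1 : ((pvL lines).take (j+1)).length = j + 1 := by simp; omega
  have hreadj1 : ((pvL lines).take (j+1) ++ (pvF lines).drop (j+1))[j+1]! = (pvF lines)[j+1]! := by
    rw [hdropj1, pv_getElem!_append_cons' _ _ _ (j+1) hlen1]
  have hFj : (pvF lines)[j]! = max (pvL lines)[j]! (pvR lines)[j]! := pvF_get lines j (by omega)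
  have hFj1 : (pvF lines)[j+1]! = max (pvL lines)[j+1]! (pvR lines)[j+1]! := pvF_get lines (j+1) (by omega)
  have hRj : (pvR lines)[j]! = if lines[j]! > lines[j+1]! then (pvR lines)[j+1]! + 1 else 1 :=
    pvR_succ lines j (by omega)
  have hLj1 : (pvL lines)[j+1]! = if lines[j+1]! > lines[j]! then (pvL lines)[j]! + 1 else 1 :=
    pvRuns_succ lines j (by omega)
  have hLge : 1 ≤ (pvL lines)[j]! := pvL_ge lines j (by omega)
  have hRge1 : 1 ≤ (pvR lines)[j+1]! := pvR_ge lines (j+1) (by omega)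
  unfold pvBwdStep
  rw [hreadj, hreadj1]
  by_cases hc : lines[j]! > lines[j+1]!
  · rw [if_pos hc, hb, pv_set_append_cons' _ _ _ _ j hlen, hdropj]
    have hvals : max (pvL lines)[j]! ((pvF lines)[j+1]! + 1) = (pvF lines)[j]! := by
      have hL1 : (pvL lines)[j+1]! = 1 := by rw [hLj1, if_neg (by omega)]
      rw [hFj1, hL1] at *
      rw [hFj, hRj, if_pos hc]
      omega
    rw [hvals]
  · rw [if_neg hc, hb, hdropj]
    have : (pvF lines)[j]! = (pvL lines)[j]! := by
      rw [hFj, hRj, if_neg hc]; omega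
    rw [this]

lemma pv_bwd_inv (lines : List Int) (j : Nat) (h : j + 2 ≤ lines.length) :
    ((List.range (j+1)).reverse).foldl (pvBwdStep lines)
        ((pvL lines).take (j+1) ++ (pvF lines).drop (j+1)) = pvF lines := by
  induction j with
  | zero =>
    show List.foldl (pvBwdStep lines) _ [0] = pvF lines
    rw [List.foldl_cons, pv_bwd_step lines 0 h, List.foldl_nil]
    simp
  | succ j ih =>
    have hsplit : (List.range (j+2)).reverse = (j+1) :: (List.range (j+1)).reverse := by
      rw [List.range_succ, List.reverse_append]; rfl
    rw [hsplit, List.foldl_cons, pv_bwd_step lines (j+1) h]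
    exact ih (by omega)

-- assembling A's two passes
lemma pv_main (lines : List Int) : assign_bonuses lines = pvF lines := by
  rcases lines with _ | ⟨x, xs⟩
  · rfl
  rcases xs with _ | ⟨y, rest⟩
  · simp [assign_bonuses, pvF, pvL, pvR, pvRuns, pvRunsGo]
  set lines := x :: y :: rest with hlines
  have hn : lines.length = rest.length + 2 := by simp [hlines]
  have hfwd : (List.range' 1 (lines.length - 1)).foldl (pvFwdStep lines)
      (List.replicate lines.length 1) = pvL lines := by
    apply pv_fwd_inv lines (lines.length - 1) 1 (by omega) (by omega)
    have h1 : (pvL lines).take 1 = [1] := by simp [pvL, hlines, pvRuns]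
    rw [h1, show lines.length = (lines.length - 1) + 1 from by omega, List.replicate_succ]
    rfl
  have hstart : pvL lines = (pvL lines).take (rest.length + 1) ++ (pvF lines).drop (rest.length + 1) := by
    have hdL : (pvL lines).drop (rest.length + 1) = [(pvL lines)[rest.length + 1]!] := by
      rw [pv_drop_eq_cons _ (rest.length + 1) (by rw [pvL_length]; omega)]
      rw [List.drop_of_length_le (by rw [pvL_length]; omega)]
    have hdF : (pvF lines).drop (rest.length + 1) = [(pvF lines)[rest.length + 1]!] := by
      rw [pv_drop_eq_cons _ (rest.length + 1) (by rw [pvF_length]; omega)]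
      rw [List.drop_of_length_le (by rw [pvF_length]; omega)]
    have hlast : (pvF lines)[rest.length + 1]! = (pvL lines)[rest.length + 1]! := by
      have hR := pvR_last lines (by omega)
      rw [show lines.length - 1 = rest.length + 1 from by omega] at hR
      rw [pvF_get lines (rest.length + 1) (by omega), hR]
      have := pvL_ge lines (rest.length + 1) (by omega)
      omega
    conv_lhs => rw [← List.take_append_drop (rest.length + 1) (pvL lines)]
    rw [hdL, hdF, hlast]
  have hbwd := pv_bwd_inv lines rest.length (by omega)
  show (((List.range (lines.length - 1)).reverse).foldl (pvBwdStep lines)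
      ((List.range' 1 (lines.length - 1)).foldl (pvFwdStep lines)
        (List.replicate lines.length 1))) = pvF lines
  rw [hfwd, show lines.length - 1 = rest.length + 1 from by omega, ← hstart] at *
  rw [hbwd]

-- ===== B-side: the single buffered pass computes pvF =====

-- right run lengths along a buffered decreasing stretch: lines[q+p-d] has pvR value d+1
lemma pvB_R_run (lines : List Int) (q p : Nat)
    (hend : q + p + 1 = lines.length ∨
      (q + p + 1 < lines.length ∧ ¬ (lines[q+p]! > lines[q+p+1]!)))
    (H1 : ∀ k, k < p → lines[q+k+1]! < lines[q+k]!) :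
    ∀ d, d ≤ p → (pvR lines)[q+p-d]! = (d : Int) + 1 := by
  intro d
  induction d with
  | zero =>
    intro _
    rcases hend with h | ⟨h1, h2⟩
    · have := pvR_last lines (by omega)
      rw [show lines.length - 1 = q + p from by omega] at this
      simpa using this
    · rw [show q + p - 0 = q + p from rfl, pvR_succ lines (q+p) (by omega), if_neg h2]
      norm_num
  | succ d ih =>
    intro hd
    have hq : q + p - (d+1) + 1 = q + p - d := by omega
    have hcond : lines[q+p-(d+1)]! > lines[q+p-(d+1)+1]! := by
      have := H1 (p - d - 1) (by omega)
      rw [show q + (p - d - 1) + 1 = q + p - d from by omega,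
          show q + (p - d - 1) = q + p - (d+1) from by omega] at this
      rw [hq]; exact this
    have hlen : q + p + 1 ≤ lines.length := by rcases hend with h | ⟨h1, _⟩ <;> omega
    rw [pvR_succ lines (q+p-(d+1)) (by omega), if_pos hcond, hq, ih (by omega)]
    push_cast; ring

-- left run lengths inside the stretch are 1
lemma pvB_L_run (lines : List Int) (q p : Nat) (hn : q + p + 1 ≤ lines.length)
    (H1 : ∀ k, k < p → lines[q+k+1]! < lines[q+k]!) :
    ∀ k, k < p → (pvL lines)[q+k+1]! = 1 := by
  intro k hk
  have h := pvRuns_succ lines (q+k) (by omega)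
  rw [pvL, h, if_neg (by have := H1 k hk; omega)]

-- emitting the buffered countdown extends the finished prefix
lemma pvB_chain (lines : List Int) (q p : Nat) (hn : q + p + 1 ≤ lines.length)
    (hend : q + p + 1 = lines.length ∨
      (q + p + 1 < lines.length ∧ ¬ (lines[q+p]! > lines[q+p+1]!)))
    (H1 : ∀ k, k < p → lines[q+k+1]! < lines[q+k]!) :
    ∀ r, r ≤ p → (pvF lines).take (q+p+1-r) ++ PySem.List.pyRange r 0 (-1)
        = (pvF lines).take (q+p+1) := by
  intro r
  induction r with
  | zero =>
    intro _
    rw [PySem.List.pyRange_neg_one_eq_nil (by norm_num)]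
    simp
  | succ r ih =>
    intro hr
    have hF : (pvF lines)[q+p-r]! = (r : Int) + 1 := by
      rw [pvF_get lines (q+p-r) (by omega)]
      have hRv := pvB_R_run lines q p hend H1 r (by omega)
      have hLv := pvB_L_run lines q p hn H1 (p - r - 1) (by omega)
      rw [show q + (p - r - 1) + 1 = q + p - r from by omega] at hLv
      rw [hRv, hLv]
      omega
    have hcons : PySem.List.pyRange ((r : Int) + 1) 0 (-1)
        = ((r : Int) + 1) :: PySem.List.pyRange ((r : Int) + 1 - 1) 0 (-1) :=
      PySem.List.pyRange_neg_one_cons (by omega)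
    rw [show ((r + 1 : Nat) : Int) = (r : Int) + 1 from by push_cast; ring,
       hcons, show ((r : Int) + 1 - 1) = (r : Int) from by ring]
    have htake : (pvF lines).take (q+p-r+1)
        = (pvF lines).take (q+p-r) ++ [(pvF lines)[q+p-r]!] :=
      pv_take_succ _ (q+p-r) (by rw [pvF_length]; omega)
    rw [show q+p+1-(r+1) = q+p-r from by omega]
    have : (pvF lines).take (q+p-r) ++ ((r : Int) + 1) :: PySem.List.pyRange (r : Int) 0 (-1)
        = ((pvF lines).take (q+p-r) ++ [(pvF lines)[q+p-r]!]) ++ PySem.List.pyRange (r : Int) 0 (-1) := by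
      rw [hF, List.append_assoc]; rfl
    rw [this, ← htake, show q+p-r+1 = q+p+1-r from by omega, ih (by omega)]

-- flushing the buffered stretch completes the prefix of pvF
lemma pvB_flush (lines : List Int) (q p : Nat) (hn : q + p + 1 ≤ lines.length)
    (hend : q + p + 1 = lines.length ∨
      (q + p + 1 < lines.length ∧ ¬ (lines[q+p]! > lines[q+p+1]!)))
    (H1 : ∀ k, k < p → lines[q+k+1]! < lines[q+k]!) :
    pvFlushB ((pvF lines).take q ++ [(pvL lines)[q]!]) (p : Int)
      = (pvF lines).take (q+p+1) := by
  have hqlen : ((pvF lines).take q).length = q := by rw [List.length_take, pvF_length]; omega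
  rcases Nat.eq_zero_or_pos p with hp | hp
  · subst hp
    have hFq : (pvF lines)[q]! = (pvL lines)[q]! := by
      rw [pvF_get lines q (by omega)]
      have hR := pvB_R_run lines q 0 hend H1 0 (by omega)
      simp only [Nat.add_zero, Nat.sub_zero, Nat.cast_zero] at hR
      have := pvL_ge lines q (by omega)
      omega
    rw [pvFlushB, if_neg (by norm_num)]
    rw [← hFq, ← pv_take_succ _ q (by rw [pvF_length]; omega)]
  · rw [pvFlushB, if_pos (by exact_mod_cast by omega)]
    have hlast : ((pvF lines).take q ++ [(pvL lines)[q]!]).getLast! = (pvL lines)[q]! :=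
      pv_getLast!_concat _ _
    have hlenr : ((pvF lines).take q ++ [(pvL lines)[q]!]).length - 1 = q := by
      rw [List.length_append, hqlen]; simp
    have hFq : (pvF lines)[q]! = max (pvL lines)[q]! ((p : Int) + 1) := by
      rw [pvF_get lines q (by omega)]
      have hR := pvB_R_run lines q p hend H1 p (by omega)
      rw [show q + p - p = q from by omega] at hR
      rw [hR]
    rw [hlast, hlenr, pv_set_append_cons' _ _ _ _ q hqlen, ← hFq,
        ← pv_take_succ _ q (by rw [pvF_length]; omega)]
    have := pvB_chain lines q p hn hend H1 p (le_refl p)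
    rw [show q + p + 1 - p = q + 1 from by omega] at this
    exact this

-- main loop invariant for B
lemma pvB_loop (lines : List Int) (m : Nat) :
    ∀ q p, q + p + 1 + m = lines.length →
    (∀ k, k < p → lines[q+k+1]! < lines[q+k]!) →
    pvFlushB ((lines.drop (q+p+1)).foldl pvStepB
        ((pvF lines).take q ++ [(pvL lines)[q]!], (p : Int), some lines[q+p]!)).1
      ((lines.drop (q+p+1)).foldl pvStepB
        ((pvF lines).take q ++ [(pvL lines)[q]!], (p : Int), some lines[q+p]!)).2.1
      = pvF lines := by
  induction m with
  | zero =>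
    intro q p hlen H1
    rw [List.drop_of_length_le (by omega), List.foldl_nil]
    have := pvB_flush lines q p (by omega) (Or.inl (by omega)) H1
    simp only [] at this ⊢
    rw [this, List.take_of_length_le (by rw [pvF_length]; omega)]
  | succ m ih =>
    intro q p hlen H1
    rw [pv_drop_eq_cons lines (q+p+1) (by omega), List.foldl_cons]
    by_cases hlt : lines[q+p+1]! < lines[q+p]!
    · have hstep : pvStepB ((pvF lines).take q ++ [(pvL lines)[q]!], (p : Int), some lines[q+p]!)
          lines[q+p+1]!
          = ((pvF lines).take q ++ [(pvL lines)[q]!], ((p+1 : Nat) : Int), some lines[q+(p+1)]!) := by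
        simp only [pvStepB, if_pos hlt]
        norm_num
        rw [show q + (p + 1) = q + p + 1 from by omega]
      rw [hstep, show q+p+1+1 = q+(p+1)+1 from by omega]
      apply ih q (p+1) (by omega)
      intro k hk
      rcases Nat.lt_or_ge k p with h | h
      · exact H1 k h
      · have : k = p := by omega
        subst this; exact hlt
    · have hflush : pvFlushB ((pvF lines).take q ++ [(pvL lines)[q]!]) (p : Int)
          = (pvF lines).take (q+p+1) :=
        pvB_flush lines q p (by omega) (Or.inr ⟨by omega, hlt⟩) H1
      have hlast : ((pvF lines).take (q+p+1)).getLast! = (pvF lines)[q+p]! := by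
        rw [pv_take_succ _ (q+p) (by rw [pvF_length]; omega), pv_getLast!_concat]
      have hrec := pvRuns_succ lines (q+p) (by omega)
      have hv : (if lines[q+p+1]! > lines[q+p]! then (pvF lines)[q+p]! + 1 else 1)
          = (pvL lines)[q+p+1]! := by
        by_cases hgt : lines[q+p+1]! > lines[q+p]!
        · have hR1 : (pvR lines)[q+p]! = 1 := by
            rw [pvR_succ lines (q+p) (by omega), if_neg (by omega)]
          have hFeq : (pvF lines)[q+p]! = (pvL lines)[q+p]! := by
            rw [pvF_get lines (q+p) (by omega), hR1]
            have := pvL_ge lines (q+p) (by omega)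
            omega
          rw [if_pos hgt, hFeq, pvL, hrec, if_pos hgt]
        · rw [if_neg hgt, pvL, hrec, if_neg hgt]
      have hstep : pvStepB ((pvF lines).take q ++ [(pvL lines)[q]!], (p : Int), some lines[q+p]!)
          lines[q+p+1]!
          = ((pvF lines).take (q+p+1) ++ [(pvL lines)[q+p+1]!], ((0 : Nat) : Int),
             some lines[q+p+1]!) := by
        simp only [pvStepB, if_neg hlt, hflush, hlast, hv]
        norm_num
      rw [hstep]
      have := ih (q+p+1) 0 (by omega) (by intro k hk; omega)
      rw [show q+p+1+0+1 = q+p+1+1 from by omega] at this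
      rw [show q+p+1+0 = q+p+1 from by omega] at this
      exact this

-- assembling B's pass
lemma pv_mainB (lines : List Int) : assign_bonuses_alt lines = pvF lines := by
  rcases lines with _ | ⟨x, xs⟩
  · rfl
  show pvFlushB _ _ = _
  have hfirst : pvStepB ([], 0, none) x = ([1], ((0 : Nat) : Int), some x) := by
    simp [pvStepB]
  have hres : ([1] : List Int)
      = (pvF (x :: xs)).take 0 ++ [(pvL (x :: xs))[0]!] := by
    rw [List.take_zero, List.nil_append, pvL, pvRuns_zero]
  have hx : x = (x :: xs)[0]! := by simp
  have := pvB_loop (x :: xs) xs.length 0 0 (by simp; omega) (by intro k hk; omega)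
  simp only [List.foldl_cons, hfirst]
  rw [hres, hx]
  simpa using this

-- ===== VERDICT (by name: the statement is the Claim_ definition above) =====
theorem assign_bonuses_spec : Claim_equal_assign_bonuses := by
  intro lines _
  show assign_bonuses lines = assign_bonuses_alt lines
  rw [pv_main, pv_mainB]
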